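-- pv_equiv track=rewrite | github.com/TechInnovation-Blockchain/DevFlexInterview | question2.py | center_zeros
-- ===== SOURCE A (Python) =====
-- from math import floor
--
-- def center_zeros(array):
--     # write your function here
--     # center means the floor(x / 2) where floor means rounding a float (decimal number) down to the nearest integer
--     # i.e. floor(1) = 1, floor(1.5) = 1, floor(1.75) = 1, floor(2) = 2
--     array_length = len(array)
--
--     if array_length == 0:
--         return []
--
--     zero_start_point = floor(array_length / 2) - 1
--     new_array = []
--
--     for value in array:
--         if value != 0:
--             new_array.append(value)
--
--     zero_count = array_length - len(new_array)
--
--     for index in range(zero_count):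
--         new_array.insert(zero_start_point + index, 0)
--
--     return new_array
--
--     pass
-- ===== SOURCE B (Python) =====
-- def center_zeros(array):
--     # Single streaming pass: precompute the zero count and the (clamped) target
--     # position, then walk the array once, emitting each non-zero and injecting
--     # the whole zero block inline the moment the target position is reached.
--     n = len(array)
--     z = array.count(0)
--     p = min(max(n // 2 - 1, 0), n - z)
--     out = []
--     placed = False
--     seen = 0
--     for v in array:
--         if v != 0:
--             if seen == p:
--                 out.extend([0] * z)
--                 placed = True
--             out.append(v)
--             seen += 1
--     if not placed:
--         out.extend([0] * z)
--     return out
-- ===== Notes on version B (the rewrite author's own statement) =====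
-- stated objective: alternative
-- what changed: Replaces A's filter-then-repeated-insert (each insert shifting the tail) with one streaming pass that emits non-zeros and injects the precomputed zero block inline when the clamped center position is reached.
import Mathlib
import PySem

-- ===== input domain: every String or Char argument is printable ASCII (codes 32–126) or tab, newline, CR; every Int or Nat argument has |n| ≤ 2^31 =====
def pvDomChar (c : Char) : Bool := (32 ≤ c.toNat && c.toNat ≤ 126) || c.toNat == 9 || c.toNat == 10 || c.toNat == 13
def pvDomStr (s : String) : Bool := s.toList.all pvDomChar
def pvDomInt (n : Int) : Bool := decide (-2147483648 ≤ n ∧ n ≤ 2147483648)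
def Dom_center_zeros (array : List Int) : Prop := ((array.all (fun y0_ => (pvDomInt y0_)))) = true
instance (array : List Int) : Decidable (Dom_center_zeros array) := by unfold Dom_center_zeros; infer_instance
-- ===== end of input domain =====

-- B replaces A's filter-then-repeated-insert loop with a single streaming pass that
-- emits non-zeros and injects the precomputed zero block inline at the clamped center
-- position (objective: alternative).

-- ===== PORT A =====
def center_zeros (array : List Int) : List Int :=
  let array_length : Int := array.length
  if array_length == 0 then []
  else
    let zero_start_point : Int := PySem.Int.floordiv array_length 2 - 1
    let new_array : List Int :=
      array.foldl (fun acc value => if value ≠ 0 then acc ++ [value] else acc) []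
    let zero_count : Int := array_length - new_array.length
    (PySem.List.pyRange 0 zero_count 1).foldl
      (fun acc index => PySem.List.insert acc (zero_start_point + index) 0) new_array

-- ===== PORT B =====
-- B's loop body (the body of the `for v in array` loop of Source B).
def czStep (p : Int) (z : Nat) (st : List Int × Bool × Nat) (v : Int) : List Int × Bool × Nat :=
  if v ≠ 0 then
    let (out, placed, seen) := st
    if ((seen : Int) == p) then (out ++ List.replicate z 0 ++ [v], true, seen + 1)
    else (out ++ [v], placed, seen + 1)
  else st

def center_zeros_alt (array : List Int) : List Int :=
  let n : Int := array.length
  let z : Nat := PySem.List.count array 0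
  let p : Int := min (max (PySem.Int.floordiv n 2 - 1) 0) (n - z)
  let st : List Int × Bool × Nat := array.foldl (czStep p z) ([], false, 0)
  if st.2.1 then st.1 else st.1 ++ List.replicate z 0

-- ===== PRECONDITION & SPEC =====
def Spec_center_zeros (array : List Int) (out : List Int) : Prop := out = center_zeros_alt array
instance (array : List Int) (out : List Int) : Decidable (Spec_center_zeros array out) := by unfold Spec_center_zeros; infer_instance

-- ===== CLAIM (what is proved, stated in full; the proofs are below) =====
def Claim_equal_center_zeros : Prop := ∀ (array : List Int), Dom_center_zeros array → Spec_center_zeros array (center_zeros array)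

-- ===== LEMMAS AND PROOFS =====

-- Python list.insert at a nonnegative index clamps the index to the length.
lemma insert_nonneg_clamp (xs : List Int) (i : Int) (v : Int) (h : 0 ≤ i) :
    PySem.List.insert xs i v =
      xs.take (min i.toNat xs.length) ++ v :: xs.drop (min i.toNat xs.length) := by
  simp only [PySem.List.insert, PySem.List.sliceIndices]
  norm_num
  split_ifs with h1
  · omega
  · have : (min i (xs.length : Int)).toNat = min i.toNat xs.length := by omega
    rw [this]

-- Inserting 0 at index start + j into the state after j inserts extends the zero block:
-- the clamped index is exactly the right edge of the block.
lemma step_lemma (nz : List Int) (start : Int) (h0 : 0 ≤ start) (j : Nat) :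
    PySem.List.insert
      (nz.take (min start.toNat nz.length) ++ List.replicate j 0
        ++ nz.drop (min start.toNat nz.length)) (start + j) 0
    = nz.take (min start.toNat nz.length) ++ List.replicate (j+1) 0
        ++ nz.drop (min start.toNat nz.length) := by
  set p := min start.toNat nz.length with hp
  have hple : p ≤ nz.length := by omega
  rw [insert_nonneg_clamp _ _ _ (by omega)]
  have hc : min (start + j).toNat (nz.take p ++ List.replicate j 0 ++ nz.drop p).length
      = p + j := by simp; omega
  rw [hc, List.append_assoc]
  have h1 : (nz.take p).length = p := by simp; omega
  generalize hA : nz.take p = A at h1 ⊢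
  generalize hB : nz.drop p = B
  have htake : (A ++ (List.replicate j (0:Int) ++ B)).take (p + j)
      = A ++ List.replicate j 0 := by
    rw [← List.append_assoc]
    exact List.take_left' (by simp [h1])
  have hdrop : (A ++ (List.replicate j (0:Int) ++ B)).drop (p + j) = B := by
    rw [← List.append_assoc]
    exact List.drop_left' (by simp [h1])
  rw [htake, hdrop]
  simp [List.replicate_succ', List.append_assoc]

-- A's whole insert loop builds the zero block at position min start.toNat nz.length.
lemma loop_lemma (nz : List Int) (start : Int) (h0 : 0 ≤ start) (zc : Nat) :
    (PySem.List.pyRange 0 (zc : Int) 1).foldl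
      (fun acc index => PySem.List.insert acc (start + index) 0) nz
    = nz.take (min start.toNat nz.length) ++ List.replicate zc 0
        ++ nz.drop (min start.toNat nz.length) := by
  induction zc with
  | zero => simp [PySem.List.pyRange_one_eq_nil]
  | succ m ih =>
    have hcast : ((m + 1 : Nat) : Int) = (m : Int) + 1 := by push_cast; ring
    rw [hcast, PySem.List.pyRange_one_succ_right (by positivity), List.foldl_append, ih]
    simpa using step_lemma nz start h0 m

-- Once the zero block is placed (seen already past p), the loop just appends the non-zeros.
lemma czGo_placed (p : Int) (z : Nat) (xs : List Int) :
    ∀ (out : List Int) (seen : Nat), p < (seen : Int) →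
    (xs.foldl (czStep p z) (out, true, seen)).1 = out ++ xs.filter (· ≠ 0) ∧
    (xs.foldl (czStep p z) (out, true, seen)).2.1 = true := by
  induction xs with
  | nil => intro out seen h; simp
  | cons x xs ih =>
    intro out seen h
    by_cases hx : x = 0
    · subst hx
      simpa [czStep] using ih out seen h
    · have hne : ¬ ((seen : Int) == p) = true := by
        simp only [beq_iff_eq]; omega
      have := ih (out ++ [x]) (seen + 1) (by push_cast; omega)
      simp only [List.foldl_cons, czStep, hx, if_neg hne, if_pos, ne_eq,
        not_false_eq_true] at this ⊢
      simpa [hx, List.append_assoc] using this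

-- Before the block is placed (seen ≤ p), the final result is: the next (p - seen)
-- non-zeros, then the zero block, then the remaining non-zeros.
lemma czGo_unplaced (p : Int) (z : Nat) (xs : List Int) :
    ∀ (out : List Int) (seen q : Nat), p = (seen : Int) + q →
    (if (xs.foldl (czStep p z) (out, false, seen)).2.1
     then (xs.foldl (czStep p z) (out, false, seen)).1
     else (xs.foldl (czStep p z) (out, false, seen)).1 ++ List.replicate z 0)
    = out ++ (xs.filter (· ≠ 0)).take q ++ List.replicate z 0 ++ (xs.filter (· ≠ 0)).drop q := by
  induction xs with
  | nil => intro out seen q h; simp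
  | cons x xs ih =>
    intro out seen q h
    by_cases hx : x = 0
    · subst hx
      simpa [czStep] using ih out seen q h
    · cases q with
      | zero =>
        have heq : ((seen : Int) == p) = true := by simp only [beq_iff_eq]; omega
        have hpl := czGo_placed p z xs (out ++ List.replicate z 0 ++ [x]) (seen + 1)
          (by push_cast; omega)
        simp only [List.foldl_cons, czStep, hx, ne_eq, not_false_eq_true, heq,
          if_pos] at hpl ⊢
        rw [hpl.2, if_pos rfl, hpl.1]
        simp [hx, List.append_assoc]
      | succ q' =>
        have hne : ¬ ((seen : Int) == p) = true := by
          simp only [beq_iff_eq]; push_cast at h ⊢; omega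
        have := ih (out ++ [x]) (seen + 1) q' (by push_cast at h ⊢; omega)
        simp only [List.foldl_cons, czStep, hx, ne_eq, not_false_eq_true, if_true,
          if_neg hne] at this ⊢
        rw [this]
        simp [hx, List.append_assoc]

-- Counting zeros is the complement of filtering them out.
lemma count_zero_add_filter_length (xs : List Int) :
    PySem.List.count xs 0 + (xs.filter (· ≠ 0)).length = xs.length := by
  simp only [PySem.List.count]
  rw [← List.countP_eq_length_filter, List.count_eq_countP]
  have h1 : List.countP (fun x => x == (0:Int)) xs = List.countP (fun x => decide (x = 0)) xs :=
    List.countP_congr (fun a _ => by simp)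
  have h2 := (List.length_eq_countP_add_countP (p := fun x => decide (x = (0:Int))) (l := xs)).symm
  have h3 : List.countP (fun x => decide (x ≠ 0)) xs
      = List.countP (fun a => decide ¬(decide ((a:Int) = 0)) = true) xs :=
    List.countP_congr (fun a _ => by simp)
  omega

-- B's port computes the take/zeros/drop splice at the clamped position p.
lemma alt_closed (array : List Int) :
    center_zeros_alt array =
      (array.filter (· ≠ 0)).take
        (min (max (PySem.Int.floordiv array.length 2 - 1) 0)
          ((array.length : Int) - PySem.List.count array 0)).toNat
      ++ List.replicate (PySem.List.count array 0) 0
      ++ (array.filter (· ≠ 0)).drop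
        (min (max (PySem.Int.floordiv array.length 2 - 1) 0)
          ((array.length : Int) - PySem.List.count array 0)).toNat := by
  have hcnt := count_zero_add_filter_length array
  set p : Int := min (max (PySem.Int.floordiv array.length 2 - 1) 0)
      ((array.length : Int) - PySem.List.count array 0) with hpdef
  have hp0 : 0 ≤ p := by
    have : (PySem.List.count array 0 : Int) ≤ (array.length : Int) := by
      exact_mod_cast Int.ofNat_le.mpr (by omega)
    simp only [hpdef, le_min_iff, le_max_iff]
    constructor
    · right; rfl
    · omega
  have hmain := czGo_unplaced p (PySem.List.count array 0) array [] 0 p.toNat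
    (by push_cast; omega)
  simp only [center_zeros_alt]
  rw [← hpdef]
  simpa using hmain

-- The two ports agree on every array of length ≥ 2 (there start = len//2 - 1 ≥ 0).
lemma main2 (array : List Int) (h2 : 2 ≤ array.length) :
    center_zeros array = center_zeros_alt array := by
  have hcnt := count_zero_add_filter_length array
  have hk : (array.filter (fun v => decide (v ≠ 0))).length ≤ array.length :=
    List.length_filter_le _ _
  have hne : ((array.length : Int) == 0) = false := by
    rw [beq_eq_false_iff_ne]; omega
  have hfd : PySem.Int.floordiv (array.length : Int) 2 = ((array.length / 2 : Nat) : Int) := by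
    simp [PySem.Int.floordiv, Int.fdiv_eq_ediv]
  rw [alt_closed]
  simp only [center_zeros, hne, Bool.false_eq_true, if_false, hfd]
  rw [PySem.List.foldl_append_ite_eq_filter (fun v => v ≠ 0) array []]
  simp only [List.nil_append]
  set nz := array.filter (fun v => decide (v ≠ 0)) with hnz
  have hstart : (0:Int) ≤ ((array.length / 2 : Nat) : Int) - 1 := by
    have : 1 ≤ array.length / 2 := by omega
    omega
  have hzc : (array.length : Int) - (nz.length : Int) = ((array.length - nz.length : Nat) : Int) := by
    omega
  rw [hzc, loop_lemma nz _ hstart]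
  have hcz : PySem.List.count array 0 = array.length - nz.length := by omega
  have hidx : (min (max (((array.length / 2 : Nat) : Int) - 1) 0)
      ((array.length : Int) - PySem.List.count array 0)).toNat
      = min (((array.length / 2 : Nat) : Int) - 1).toNat nz.length := by
    omega
  rw [hidx, hcz]

-- ===== VERDICT (by name: the statement is the Claim_ definition above) =====
theorem center_zeros_spec : Claim_equal_center_zeros := by
  unfold Claim_equal_center_zeros Spec_center_zeros
  intro array _
  rcases array with _ | ⟨x, _ | ⟨y, rest⟩⟩
  · decide
  · by_cases hx : x = 0
    · subst hx; decide
    · simp [center_zeros, center_zeros_alt, czStep, hx, PySem.Int.floordiv,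
        PySem.List.pyRange_one_eq_nil, PySem.List.count]
  · exact main2 _ (by simp)
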